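-- pv_equiv track=rewrite | github.com/daniel-reich/ubiquitous-fiesta | wBuZ2Qp9okzGeZc6e_6.py | first_place
-- ===== SOURCE A (Python) =====
-- def first_place(road):
--   if road:
--     if [x for x in road if x.isalpha()]:
--       return [x for x in road if x.isalpha()][-1]
--     else:
--       return None
--   else:
--     return None
-- ===== SOURCE B (Python) =====
-- def first_place(road):
--     for x in reversed(road):
--         if x.isalpha():
--             return x
--     return None
-- ===== Notes on version B (the rewrite author's own statement) =====
-- stated objective: faster
-- what changed: Replaces A's twice-built full filtered list plus a [-1] index with a single early-exit reverse scan returning the first alphabetic character found.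
import Mathlib
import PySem

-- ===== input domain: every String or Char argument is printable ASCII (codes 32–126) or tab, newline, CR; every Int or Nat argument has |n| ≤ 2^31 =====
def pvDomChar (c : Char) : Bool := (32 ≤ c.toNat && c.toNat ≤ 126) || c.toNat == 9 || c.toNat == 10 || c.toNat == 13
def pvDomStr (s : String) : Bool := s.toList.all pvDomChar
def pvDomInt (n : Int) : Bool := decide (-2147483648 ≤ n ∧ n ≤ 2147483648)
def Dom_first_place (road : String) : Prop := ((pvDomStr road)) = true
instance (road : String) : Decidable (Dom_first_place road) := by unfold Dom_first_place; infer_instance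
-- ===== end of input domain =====

-- B replaces A's twice-built filtered list and [-1] index with a single early-exit reverse scan (objective: simpler).

-- ===== PORT A =====
def first_place (road : String) : Option String :=
  if road.toList ≠ [] then
    if road.toList.filter PySem.Chars.isalpha ≠ [] then
      (PySem.List.pyGet? (road.toList.filter PySem.Chars.isalpha) (-1)).map
        (fun c => String.mk [c])
    else none
  else none

-- ===== PORT B =====
def firstAlphaRev : List Char → Option String
  | [] => none
  | c :: cs => if PySem.Chars.isalpha c then some (String.mk [c]) else firstAlphaRev cs

def first_place_alt (road : String) : Option String :=
  firstAlphaRev road.toList.reverse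

-- ===== PRECONDITION & SPEC =====
def Spec_first_place (road : String) (out : Option String) : Prop := out = first_place_alt road
instance (road : String) (out : Option String) : Decidable (Spec_first_place road out) := by unfold Spec_first_place; infer_instance

-- ===== CLAIM (what is proved, stated in full; the proofs are below) =====
def Claim_equal_first_place : Prop := ∀ (road : String), Dom_first_place road → Spec_first_place road (first_place road)

-- ===== LEMMAS AND PROOFS =====

theorem firstAlphaRev_eq_head (l : List Char) :
    firstAlphaRev l = (l.filter PySem.Chars.isalpha).head?.map (fun c => String.mk [c]) := by
  induction l with
  | nil => rfl
  | cons c cs ih =>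
    simp only [firstAlphaRev, List.filter_cons]
    by_cases h : PySem.Chars.isalpha c <;> simp [h, ih]

-- ===== VERDICT (by name: the statement is the Claim_ definition above) =====
theorem first_place_spec : Claim_equal_first_place := by
  intro road _
  unfold Spec_first_place first_place first_place_alt
  rw [firstAlphaRev_eq_head, List.filter_reverse, List.head?_reverse]
  split_ifs with h1 h2
  · rw [PySem.List.pyGet?_neg_one]
  · simp [List.getLast?_eq_none_iff.mpr (not_ne_iff.mp h2)]
  · simp [not_ne_iff.mp h1]
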